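-- pv_equiv track=rewrite | github.com/jaehaaheaj/ProjectEuler | python/PE024.py | lexi
-- ===== SOURCE A (Python) =====
-- def factorial(n):
-- 	if n == 0:
-- 		return 1
-- 	else:
-- 		return n * factorial(n-1)
--
-- def lexi(digit, n):
-- 	orderList = []
-- 	for i in range(digit-1, 0, -1):
-- 		x = 0
-- 		while n >= factorial(i):
-- 			n -= factorial(i)
-- 			x += 1
-- 		orderList.append(x)
-- 	orderList.append(0)
-- 	return orderList
-- ===== SOURCE B (Python) =====
-- def lexi(digit, n):
--     facts = [1]
--     for i in range(1, digit):
--         facts.append(facts[-1] * i)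
--     out = []
--     for f in reversed(facts[1:]):
--         q, n = divmod(n, f)
--         out.append(q)
--     out.append(0)
--     return out
-- ===== Notes on version B (the rewrite author's own statement) =====
-- stated objective: faster
-- what changed: B precomputes the factorials once with a running product and replaces each inner repeated-subtraction while-loop (which recomputes factorial(i) recursively on every test) with a single divmod per position; Pre_ excludes negative n with digit >= 2 (an unspecified corner where A returns all zeros and B floor-divides) and digit >= 998, exactly where A's recursive factorial raises RecursionError.
-- outside the precondition, e.g. on lexi(3, -1): A returns [0, 0, 0], B returns [-1, 1, 0]
import Mathlib
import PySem

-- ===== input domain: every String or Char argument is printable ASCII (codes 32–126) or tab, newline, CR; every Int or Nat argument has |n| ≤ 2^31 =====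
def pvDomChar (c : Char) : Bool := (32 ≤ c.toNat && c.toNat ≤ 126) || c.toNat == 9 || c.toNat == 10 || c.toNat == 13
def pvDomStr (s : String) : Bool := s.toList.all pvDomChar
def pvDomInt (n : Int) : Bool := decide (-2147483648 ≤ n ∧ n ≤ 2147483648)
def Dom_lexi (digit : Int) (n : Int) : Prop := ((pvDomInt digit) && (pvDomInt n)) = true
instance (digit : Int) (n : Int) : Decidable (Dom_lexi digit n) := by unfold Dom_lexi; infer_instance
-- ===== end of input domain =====

-- B replaces A's inner repeated-subtraction loops (which recompute factorial(i)
-- recursively on every test) by one divmod per position over factorials precomputed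
-- with a running product (measurably faster; asymptotic change).

-- ===== PORT A =====
-- factorial(n); Python recurses on n-1 (for n < 0 Python raises RecursionError;
-- A only ever calls it with n ≥ 1, so the n ≤ 0 guard is a pure totality guard).
def factA (n : Int) : Int :=
  if n ≤ 0 then 1 else n * factA (n - 1)
termination_by n.toNat
decreasing_by omega

-- the inner 'while n >= factorial(i): n -= factorial(i); x += 1' loop
-- (the '1 ≤ f' conjunct is a totality guard; factorial(i) ≥ 1 for every call site)
def subLoopA (f : Int) (n : Int) (x : Int) : Int × Int :=
  if h : 1 ≤ f ∧ f ≤ n then subLoopA f (n - f) (x + 1) else (x, n)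
termination_by n.toNat
decreasing_by omega

def lexi (digit : Int) (n : Int) : List Int :=
  let st := (PySem.List.pyRange (digit - 1) 0 (-1)).foldl
    (fun (st : List Int × Int) i =>
      let p := subLoopA (factA i) st.2 0
      (st.1 ++ [p.1], p.2)) ([], n)
  st.1 ++ [0]

-- ===== PORT B =====
-- facts = [1]; for i in range(1, digit): facts.append(facts[-1] * i)
def factsB (digit : Int) : List Int :=
  (PySem.List.pyRange 1 digit 1).foldl (fun acc i => acc ++ [acc.getLast! * i]) [1]

def lexi_alt (digit : Int) (n : Int) : List Int :=
  let st := ((factsB digit).drop 1).reverse.foldl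
    (fun (st : List Int × Int) f =>
      (st.1 ++ [PySem.Int.floordiv st.2 f], PySem.Int.mod st.2 f)) ([], n)
  st.1 ++ [0]

-- ===== PRECONDITION & SPEC =====
-- Pre_ excludes (a) negative n with digit ≥ 2, outside the task's natural domain of
-- permutation indices: an unspecified corner where A's while-loops never run and it
-- returns all zeros while B's floor divmod yields negative quotients (neither value
-- is specified); and (b) digit ≥ 998, exactly where A's recursive factorial exceeds
-- Python's default recursion limit and raises RecursionError (A returns at digit = 997
-- and raises RecursionError at digit = 998, where B returns the normal digit list).
def Pre_lexi (digit : Int) (n : Int) : Prop := (0 ≤ n ∨ digit ≤ 1) ∧ digit ≤ 997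
instance (digit : Int) (n : Int) : Decidable (Pre_lexi digit n) := by unfold Pre_lexi; infer_instance
def pvWitness_lexi : Int × Int := (4, 13)


def Spec_lexi (digit : Int) (n : Int) (out : List Int) : Prop := out = lexi_alt digit n
instance (digit : Int) (n : Int) (out : List Int) : Decidable (Spec_lexi digit n out) := by unfold Spec_lexi; infer_instance

-- ===== CLAIM (what is proved, stated in full; the proofs are below) =====
def Claim_equal_lexi : Prop := ∀ (digit : Int) (n : Int), Dom_lexi digit n → Pre_lexi digit n → Spec_lexi digit n (lexi digit n)

-- ===== LEMMAS AND PROOFS =====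

theorem factA_pos (n : Int) : 1 ≤ factA n := by
  induction n using factA.induct with
  | case1 n h => rw [factA]; simp [h]
  | case2 n h ih =>
    rw [factA]
    simp only [if_neg h]
    nlinarith

theorem getLast!_concat_int (xs : List Int) (a : Int) : (xs ++ [a]).getLast! = a := by
  rw [List.getLast!_eq_getLast?_getD, List.getLast?_append, List.getLast?_singleton]
  rfl

theorem subLoopA_eq (f : Int) (hf : 1 ≤ f) : ∀ (m : Nat) (n x : Int), n.toNat = m → 0 ≤ n →
    subLoopA f n x = (x + PySem.Int.floordiv n f, PySem.Int.mod n f) := by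
  intro m
  induction m using Nat.strong_induction_on with
  | _ m ih =>
    intro n x hm hn
    rw [subLoopA]
    by_cases h : 1 ≤ f ∧ f ≤ n
    · rw [dif_pos h]
      rw [ih (n - f).toNat (by omega) (n - f) (x + 1) rfl (by omega)]
      rw [PySem.Int.floordiv_eq_ediv_of_pos (by omega), PySem.Int.floordiv_eq_ediv_of_pos (by omega),
          PySem.Int.mod_eq_emod_of_pos (by omega), PySem.Int.mod_eq_emod_of_pos (by omega)]
      rw [Prod.mk.injEq]
      constructor
      · have he : n - f = n + (-1) * f := by ring
        rw [he, Int.add_mul_ediv_right _ _ (by omega : f ≠ 0)]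
        ring
      · exact Int.sub_emod_right n f
    · rw [dif_neg h]
      have hlt : n < f := by omega
      rw [PySem.Int.floordiv_eq_ediv_of_pos (by omega), PySem.Int.mod_eq_emod_of_pos (by omega)]
      rw [Int.ediv_eq_zero_of_lt hn hlt, Int.emod_eq_of_lt hn hlt]
      simp

theorem factA_succ (m : Int) (hm : 0 ≤ m) : factA (m + 1) = (m + 1) * factA m := by
  rw [factA, if_neg (by omega)]
  norm_num

theorem factsB_eq (digit : Int) (hd : 1 ≤ digit) :
    factsB digit = (PySem.List.pyRange 0 digit 1).map factA := by
  have key : ∀ k : Nat, factsB (1 + k) = (PySem.List.pyRange 0 (1 + k) 1).map factA := by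
    intro k
    induction k with
    | zero =>
      unfold factsB
      rw [PySem.List.pyRange_one_eq_nil (by omega)]
      rw [show ((1:Int) + ((0:Nat):Int)) = 0 + 1 by norm_num, PySem.List.pyRange_one_singleton 0]
      simp [factA]
    | succ m ih =>
      have h1 : PySem.List.pyRange 1 (1 + ((m + 1 : Nat) : Int)) 1
          = PySem.List.pyRange 1 (1 + (m : Int)) 1 ++ [1 + (m : Int)] := by
        rw [show ((1:Int) + ((m + 1 : Nat) : Int)) = (1 + (m:Int)) + 1 by push_cast; ring]
        exact PySem.List.pyRange_one_succ_right (by omega)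
      have h2 : PySem.List.pyRange 0 (1 + ((m + 1 : Nat) : Int)) 1
          = PySem.List.pyRange 0 (1 + (m : Int)) 1 ++ [1 + (m : Int)] := by
        rw [show ((1:Int) + ((m + 1 : Nat) : Int)) = (1 + (m:Int)) + 1 by push_cast; ring]
        exact PySem.List.pyRange_one_succ_right (by omega)
      have h3 : PySem.List.pyRange 0 (1 + (m : Int)) 1
          = PySem.List.pyRange 0 (m : Int) 1 ++ [(m : Int)] := by
        rw [show ((1:Int) + (m:Int)) = (m:Int) + 1 by ring]
        exact PySem.List.pyRange_one_succ_right (by omega)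
      have hlast : ((PySem.List.pyRange 0 (1 + (m : Int)) 1).map factA).getLast! = factA (m : Int) := by
        rw [h3, List.map_append]
        exact getLast!_concat_int _ _
      unfold factsB at ih ⊢
      rw [h1, List.foldl_append, ih, List.foldl_cons, List.foldl_nil, h2, List.map_append, hlast]
      congr 2
      rw [show ((1:Int) + (m:Int)) = (m:Int) + 1 by ring, factA_succ _ (by omega)]
      ring
  obtain ⟨k, hk⟩ : ∃ k : Nat, digit = 1 + (k : Int) := ⟨(digit - 1).toNat, by omega⟩
  rw [hk]
  exact key k

theorem foldl_eq (L : List Int) (acc : List Int) (n : Int)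
    (hL : ∀ i ∈ L, 1 ≤ i) (hn : 0 ≤ n) :
    L.foldl (fun (st : List Int × Int) i =>
        let p := subLoopA (factA i) st.2 0
        (st.1 ++ [p.1], p.2)) (acc, n)
    = L.foldl (fun (st : List Int × Int) i =>
        (st.1 ++ [PySem.Int.floordiv st.2 (factA i)], PySem.Int.mod st.2 (factA i))) (acc, n) := by
  induction L generalizing acc n with
  | nil => rfl
  | cons i L ih =>
    simp only [List.foldl_cons]
    have hf : 1 ≤ factA i := factA_pos i
    simp only [subLoopA_eq (factA i) hf n.toNat n 0 rfl hn]
    simp only [zero_add]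
    exact ih _ _ (fun j hj => hL j (List.mem_cons_of_mem _ hj))
      (PySem.Int.mod_nonneg _ (by omega))

theorem factsB_drop_reverse (digit : Int) :
    ((factsB digit).drop 1).reverse = (PySem.List.pyRange (digit - 1) 0 (-1)).map factA := by
  by_cases hd : 1 ≤ digit
  · have h1 := factsB_eq digit hd
    rw [h1]
    rw [PySem.List.pyRange_one_cons (by omega : (0:Int) < digit)]
    simp only [List.map_cons, List.drop_succ_cons, List.drop_zero]
    rw [PySem.List.pyRange_neg_one_eq_reverse]
    rw [show digit - 1 + 1 = digit by ring, show (0:Int) + 1 = 1 by ring]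
    rw [List.map_reverse]
  · unfold factsB
    rw [PySem.List.pyRange_one_eq_nil (by omega), PySem.List.pyRange_neg_one_eq_nil (by omega)]
    simp


-- ===== VERDICT (by name: the statement is the Claim_ definition above) =====
theorem lexi_spec : Claim_equal_lexi := by
  intro digit n _ hpre
  obtain ⟨hn | hd1, -⟩ := hpre
  · unfold Spec_lexi lexi lexi_alt
    rw [factsB_drop_reverse, List.foldl_map]
    rw [foldl_eq _ _ _ (fun i hi => ((PySem.List.mem_pyRange_neg_one).1 hi).1) hn]
  · unfold Spec_lexi lexi lexi_alt
    rw [factsB_drop_reverse, PySem.List.pyRange_neg_one_eq_nil (by omega)]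
    simp
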